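-- pv_equiv track=rewrite | github.com/BaeJihyun97/CodingTest | 프로그래머스/2/150368. 이모티콘 할인행사/이모티콘 할인행사.py | calculate
-- ===== SOURCE A (Python) =====
-- def calculate(discounts, users, emoticons):
--     plus_n, sales = 0, 0
--     emoticons_ = list(zip(discounts, emoticons))
--     for user in users:
--         percent, thr_price = user
--         tot_price = sum([p * (100-d) // 100 for d, p in emoticons_ if d >= percent ])
--         if tot_price >= thr_price:
--             plus_n += 1
--         else:
--             sales += tot_price
--     return plus_n, sales
-- ===== SOURCE B (Python) =====
-- def calculate(discounts, users, emoticons):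
--     # precompute discounted prices, sort by discount ascending, prefix sums,
--     # then binary-search each user's percent instead of rescanning all emoticons
--     pairs = sorted(((d, p * (100 - d) // 100) for d, p in zip(discounts, emoticons)),
--                    key=lambda e: e[0])
--     ds = [e[0] for e in pairs]
--     prefix = [0]
--     acc = 0
--     for _, q in pairs:
--         acc += q
--         prefix.append(acc)
--     total = acc
--     plus_n, sales = 0, 0
--     for percent, thr_price in users:
--         lo, hi = 0, len(ds)
--         while lo < hi:
--             mid = (lo + hi) // 2
--             if ds[mid] < percent:
--                 lo = mid + 1
--             else:
--                 hi = mid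
--         tot_price = total - prefix[lo]
--         if tot_price >= thr_price:
--             plus_n += 1
--         else:
--             sales += tot_price
--     return plus_n, sales
-- ===== Notes on version B (the rewrite author's own statement) =====
-- stated objective: faster
-- what changed: Instead of rescanning every emoticon for every user, B sorts the (discount, discounted-price) pairs once, builds a prefix-sum array, and answers each user with a hand-written binary search plus a suffix-sum lookup.
import Mathlib
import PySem

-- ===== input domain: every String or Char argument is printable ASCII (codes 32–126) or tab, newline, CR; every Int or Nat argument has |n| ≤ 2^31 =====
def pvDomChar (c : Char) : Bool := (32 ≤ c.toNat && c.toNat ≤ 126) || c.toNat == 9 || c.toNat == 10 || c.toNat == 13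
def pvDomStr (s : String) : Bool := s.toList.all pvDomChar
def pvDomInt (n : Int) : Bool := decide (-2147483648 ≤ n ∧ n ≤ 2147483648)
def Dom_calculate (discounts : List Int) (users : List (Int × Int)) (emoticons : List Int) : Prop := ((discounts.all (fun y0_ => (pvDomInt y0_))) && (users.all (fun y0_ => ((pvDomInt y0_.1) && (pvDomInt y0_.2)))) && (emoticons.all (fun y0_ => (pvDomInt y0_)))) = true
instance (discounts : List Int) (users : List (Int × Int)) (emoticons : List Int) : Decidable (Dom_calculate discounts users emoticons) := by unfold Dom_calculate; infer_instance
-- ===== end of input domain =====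

-- B sorts the (discount, discounted-price) pairs once, builds prefix sums and binary-searches
-- each user's percent, instead of A's rescan of all emoticons per user. Return values are equal.

-- ===== PORT A =====
def calculate (discounts : List Int) (users : List (Int × Int)) (emoticons : List Int) : Int × Int :=
  -- plus_n, sales = 0, 0 ; emoticons_ = list(zip(discounts, emoticons)) ; for user in users: …
  let emoticons_ := discounts.zip emoticons
  users.foldl (fun (st : Int × Int) user =>
    let percent := user.1
    let thr_price := user.2
    let tot_price := ((emoticons_.filter (fun e => decide (e.1 ≥ percent))).map
        (fun e => PySem.Int.floordiv (e.2 * (100 - e.1)) 100)).sum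
    if tot_price ≥ thr_price then (st.1 + 1, st.2) else (st.1, st.2 + tot_price)) (0, 0)

-- ===== PORT B =====
-- while lo < hi: mid = (lo+hi)//2; if ds[mid] < percent: lo = mid+1 else: hi = mid
-- (ds[mid] ported as getD: the loop keeps 0 ≤ lo ≤ mid < hi ≤ len(ds), so the index is in range)
def pvBisect (ds : List Int) (x : Int) (lo hi : Nat) : Nat :=
  if _h : lo < hi then
    let mid := (lo + hi) / 2
    if ds.getD mid 0 < x then pvBisect ds x (mid + 1) hi else pvBisect ds x lo mid
  else lo
termination_by hi - lo
decreasing_by all_goals omega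

def calculate_alt (discounts : List Int) (users : List (Int × Int)) (emoticons : List Int) : Int × Int :=
  let pairs := PySem.List.sorted
    ((discounts.zip emoticons).map (fun e => (e.1, PySem.Int.floordiv (e.2 * (100 - e.1)) 100)))
    (fun e => e.1) false
  let ds := pairs.map (fun e => e.1)
  let pa := pairs.foldl (fun (st : Int × List Int) e =>
      (st.1 + e.2, st.2 ++ [st.1 + e.2])) (0, ([0] : List Int))
  let total := pa.1
  let pref := pa.2
  users.foldl (fun (st : Int × Int) user =>
    let percent := user.1
    let thr_price := user.2
    let lo := pvBisect ds percent 0 ds.length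
    let tot_price := total - pref.getD lo 0
    if tot_price ≥ thr_price then (st.1 + 1, st.2) else (st.1, st.2 + tot_price)) (0, 0)

-- ===== PRECONDITION & SPEC =====
def Spec_calculate (discounts : List Int) (users : List (Int × Int)) (emoticons : List Int) (out : Int × Int) : Prop := out = calculate_alt discounts users emoticons
instance (discounts : List Int) (users : List (Int × Int)) (emoticons : List Int) (out : Int × Int) : Decidable (Spec_calculate discounts users emoticons out) := by unfold Spec_calculate; infer_instance

-- ===== CLAIM (what is proved, stated in full; the proofs are below) =====
def Claim_equal_calculate : Prop := ∀ (discounts : List Int) (users : List (Int × Int)) (emoticons : List Int), Dom_calculate discounts users emoticons → Spec_calculate discounts users emoticons (calculate discounts users emoticons)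

-- ===== LEMMAS AND PROOFS =====

-- binary-search invariant: pvBisect splits [lo, hi) at the first element ≥ x (sorted input)
theorem pvBisect_spec (ds : List Int) (x : Int)
    (hs : ds.Pairwise (fun a b => a ≤ b)) :
    ∀ fuel lo hi, hi - lo ≤ fuel → lo ≤ hi → hi ≤ ds.length →
      lo ≤ pvBisect ds x lo hi ∧ pvBisect ds x lo hi ≤ hi ∧
      (∀ j (hj : j < ds.length), lo ≤ j → j < pvBisect ds x lo hi → ds[j] < x) ∧
      (∀ j (hj : j < ds.length), pvBisect ds x lo hi ≤ j → j < hi → x ≤ ds[j]) := by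
  have hmono : ∀ i j (hi : i < ds.length) (hj : j < ds.length), i ≤ j → ds[i] ≤ ds[j] := by
    intro i j hi hj hij
    rcases Nat.lt_or_ge i j with h | h
    · exact (List.pairwise_iff_getElem.mp hs) i j hi hj h
    · have : i = j := by omega
      subst this; exact le_refl _
  intro fuel
  induction fuel with
  | zero =>
    intro lo hi hf hle hlen
    have : lo = hi := by omega
    subst this
    rw [pvBisect]; simp only [dif_neg (lt_irrefl lo)]
    exact ⟨le_refl _, le_refl _, by omega, by omega⟩
  | succ n ih =>
    intro lo hi hf hle hlen
    rw [pvBisect]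
    by_cases h : lo < hi
    · simp only [dif_pos h]
      set mid := (lo + hi) / 2 with hmid
      have hb : lo ≤ mid ∧ mid < hi := by constructor <;> omega
      have hmidlt : mid < ds.length := by omega
      have hd : ds.getD mid 0 = ds[mid] := List.getD_eq_getElem _ _ hmidlt
      by_cases hm : ds.getD mid 0 < x
      · simp only [if_pos hm]
        obtain ⟨h1, h2, h3, h4⟩ := ih (mid + 1) hi (by omega) (by omega) hlen
        refine ⟨by omega, h2, ?_, h4⟩
        intro j hj hjlo hjr
        rcases Nat.lt_or_ge j (mid + 1) with hc | hc
        · exact lt_of_le_of_lt (hmono j mid hj hmidlt (by omega)) (hd ▸ hm)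
        · exact h3 j hj hc hjr
      · simp only [if_neg hm]
        obtain ⟨h1, h2, h3, h4⟩ := ih lo mid (by omega) (by omega) (by omega)
        refine ⟨h1, by omega, h3, ?_⟩
        intro j hj hjr hjhi
        rcases Nat.lt_or_ge j mid with hc | hc
        · exact h4 j hj hjr hc
        · exact le_trans (le_of_not_gt (hd ▸ hm)) (hmono mid j hmidlt hj hc)
    · simp only [dif_neg h]
      exact ⟨le_refl _, hle, by omega, by omega⟩

-- the prefix fold computes (acc + sum, pre ++ running sums)
theorem prefix_fold (l : List (Int × Int)) :
    ∀ (acc : Int) (pre : List Int),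
      l.foldl (fun (st : Int × List Int) e => (st.1 + e.2, st.2 ++ [st.1 + e.2])) (acc, pre)
        = (acc + (l.map (fun e => e.2)).sum,
           pre ++ (List.range l.length).map (fun i => acc + ((l.map (fun e => e.2)).take (i+1)).sum)) := by
  induction l with
  | nil => simp
  | cons e t ih =>
    intro acc pre
    simp only [List.foldl_cons, ih, List.map_cons, List.sum_cons, List.length_cons,
      List.range_succ_eq_map, List.map_map]
    refine Prod.ext ?_ ?_
    · simp; ring
    · simp only [List.append_assoc, List.singleton_append]
      congr 1
      · simp
        intro a _
        ring

-- getD on the built prefix list is the sum of the first lo discounted prices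
theorem prefix_getD (qs : List Int) (lo : Nat) (hlo : lo ≤ qs.length) :
    (((0 : Int) :: (List.range qs.length).map (fun i => 0 + (qs.take (i+1)).sum)).getD lo 0)
      = (qs.take lo).sum := by
  cases lo with
  | zero => simp
  | succ i =>
    have hi : i < qs.length := by omega
    rw [List.getD_cons_succ]
    rw [List.getD_eq_getElem _ _ (by simpa using hi)]
    simp

-- filter of a sorted list where the split point separates < x from ≥ x
theorem filter_eq_drop (sp : List (Int × Int)) (x : Int) (r : Nat) (hr : r ≤ sp.length)
    (h1 : ∀ j (hj : j < sp.length), j < r → sp[j].1 < x)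
    (h2 : ∀ j (hj : j < sp.length), r ≤ j → x ≤ sp[j].1) :
    sp.filter (fun e => decide (e.1 ≥ x)) = sp.drop r := by
  conv_lhs => rw [← List.take_append_drop r sp]
  rw [List.filter_append]
  have ht : (sp.take r).filter (fun e => decide (e.1 ≥ x)) = [] := by
    rw [List.filter_eq_nil_iff]
    intro a ha
    obtain ⟨i, hi, hget⟩ := List.mem_iff_getElem.mp ha
    have hilen : i < sp.length := by
      have := hi; simp [List.length_take] at this; omega
    have : a = sp[i] := by rw [← hget]; exact (List.getElem_take)
    subst this
    have hir : i < r := by have := hi; simp [List.length_take] at this; omega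
    simp only [decide_eq_true_eq]
    exact not_le_of_gt (h1 i hilen hir)
  have hd : (sp.drop r).filter (fun e => decide (e.1 ≥ x)) = sp.drop r := by
    rw [List.filter_eq_self]
    intro a ha
    obtain ⟨i, hi, hget⟩ := List.mem_iff_getElem.mp ha
    have hlen : r + i < sp.length := by
      have := hi; simp [List.length_drop] at this; omega
    have : a = sp[r + i] := by rw [← hget]; exact (List.getElem_drop ..)
    subst this
    simp only [decide_eq_true_eq]
    exact h2 (r+i) hlen (by omega)
  rw [ht, hd, List.nil_append]

-- per-user total: A's filtered rescan = B's suffix sum at the binary-search split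
theorem tot_eq (discounts emoticons : List Int) (x : Int) :
    (((discounts.zip emoticons).filter (fun e => decide (e.1 ≥ x))).map
        (fun e => PySem.Int.floordiv (e.2 * (100 - e.1)) 100)).sum
      = (let pairs := PySem.List.sorted
            ((discounts.zip emoticons).map (fun e => (e.1, PySem.Int.floordiv (e.2 * (100 - e.1)) 100)))
            (fun e => e.1) false
         let ds := pairs.map (fun e => e.1)
         let qs := pairs.map (fun e => e.2)
         qs.sum - (qs.take (pvBisect ds x 0 ds.length)).sum) := by
  simp only []
  set g : Int × Int → Int := fun e => PySem.Int.floordiv (e.2 * (100 - e.1)) 100 with hg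
  set pairs0 := (discounts.zip emoticons).map (fun e => ((e.1 : Int), g e)) with hp0
  set sp := PySem.List.sorted pairs0 (fun e => e.1) false with hsp
  set ds := sp.map (fun e => e.1) with hds
  set qs := sp.map (fun e => e.2) with hqs
  set r := pvBisect ds x 0 ds.length with hr
  have hpair : ds.Pairwise (fun a b => a ≤ b) := by
    rw [hds, hsp]; exact PySem.List.sorted_map_key_pairwise ..
  have hdlen : ds.length = sp.length := by simp [hds]
  obtain ⟨_, hle, hlt, hge⟩ := pvBisect_spec ds x hpair ds.length 0 ds.length (by omega) (by omega) (le_refl _)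
  have hrlen : r ≤ sp.length := by omega
  have hfd : sp.filter (fun e => decide (e.1 ≥ x)) = sp.drop r := by
    apply filter_eq_drop sp x r hrlen
    · intro j hj hjr
      have := hlt j (by omega) (by omega) (by rw [hr] at hjr; omega)
      simpa [hds] using this
    · intro j hj hjr
      have := hge j (by omega) (by rw [hr] at hjr; omega) (by omega)
      simpa [hds] using this
  have hperm : sp.Perm pairs0 := PySem.List.sorted_perm ..
  have hA : (((discounts.zip emoticons).filter (fun e => decide (e.1 ≥ x))).map g).sum
      = ((sp.filter (fun e => decide (e.1 ≥ x))).map (fun e => e.2)).sum := by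
    have h1 : (((discounts.zip emoticons).filter (fun e => decide (e.1 ≥ x))).map g).sum
        = ((pairs0.filter (fun e => decide (e.1 ≥ x))).map (fun e => e.2)).sum := by
      rw [hp0]
      induction (discounts.zip emoticons) with
      | nil => simp
      | cons e t ih => by_cases h : decide (e.1 ≥ x) <;> simp_all
    rw [h1]
    exact ((List.Perm.map _ (List.Perm.filter _ hperm)).sum_eq).symm
  rw [hA, hfd]
  have : (sp.drop r).map (fun e => e.2) = qs.drop r := by simp [hqs, List.map_drop]
  rw [this]
  have := List.sum_take_add_sum_drop qs r
  omega

-- ===== VERDICT (by name: the statement is the Claim_ definition above) =====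
theorem calculate_spec : Claim_equal_calculate := by
  intro discounts users emoticons _
  simp only [Spec_calculate, calculate, calculate_alt]
  rw [prefix_fold]
  apply PySem.List.foldl_congr_mem
  intro st user _
  have htot := tot_eq discounts emoticons user.1
  simp only [] at htot
  rw [htot]
  set sp := PySem.List.sorted
      ((discounts.zip emoticons).map (fun e => ((e.1 : Int), PySem.Int.floordiv (e.2 * (100 - e.1)) 100)))
      (fun e => e.1) false with hsp
  set ds := sp.map (fun e => (e.1 : Int)) with hds
  set qs := sp.map (fun e => (e.2 : Int)) with hqs
  set lo := pvBisect ds user.1 0 ds.length with hlo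
  have hpair : ds.Pairwise (fun a b => a ≤ b) := by
    rw [hds, hsp]; exact PySem.List.sorted_map_key_pairwise ..
  obtain ⟨_, hle, _, _⟩ := pvBisect_spec ds user.1 hpair ds.length 0 ds.length (by omega) (by omega) (le_refl _)
  have hlole : lo ≤ qs.length := by
    have h1 : ds.length = sp.length := by simp [hds]
    have h2 : qs.length = sp.length := by simp [hqs]
    omega
  have hpref := prefix_getD qs lo hlole
  have hlen : sp.length = qs.length := by simp [hqs]
  rw [hlen]
  simp only [List.singleton_append] at *
  rw [hpref]
  simp
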